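-- pv_equiv track=rewrite | github.com/joaovarela14/FP | aula05/ex8.py | evenThenOdd
-- ===== SOURCE A (Python) =====
-- def evenThenOdd(x):
--        pares=""
--        impares=""
--        for i in range (len(x)):
--               if i==0 or i %2==0:
--                      pares+=x[i]
--
--               else: impares+=x[i]
--
--        return pares + impares
-- ===== SOURCE B (Python) =====
-- def evenThenOdd(x):
--     return x[::2] + x[1::2]
-- ===== Notes on version B (the rewrite author's own statement) =====
-- stated objective: idiomatic
-- what changed: Replaced the indexed loop with two string accumulators branching on index parity by two stride slices: x[::2] (even indices) concatenated with x[1::2] (odd indices).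
import Mathlib
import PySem

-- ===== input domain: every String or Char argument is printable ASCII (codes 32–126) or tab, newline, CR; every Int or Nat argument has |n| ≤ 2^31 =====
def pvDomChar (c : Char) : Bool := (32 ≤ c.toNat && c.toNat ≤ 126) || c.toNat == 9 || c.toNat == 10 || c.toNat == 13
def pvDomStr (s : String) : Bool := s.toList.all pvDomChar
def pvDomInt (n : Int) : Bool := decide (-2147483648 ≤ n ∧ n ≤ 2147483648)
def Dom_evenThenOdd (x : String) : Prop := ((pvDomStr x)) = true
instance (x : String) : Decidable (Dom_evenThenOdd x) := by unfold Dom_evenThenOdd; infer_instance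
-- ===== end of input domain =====

-- B replaces A's indexed loop with two string accumulators by two stride slices x[::2] + x[1::2] (idiomatic).


-- ===== PORT A =====
-- literal port: loop over range(len(x)), append x[i] to `pares` when i == 0 or i % 2 == 0,
-- else to `impares`; return pares + impares.  x[i] never raises here (i in range(len(x))),
-- so the `none` branch of pyGet? is unreachable and keeps the state unchanged.
def evenThenOdd (x : String) : String :=
  let r := (PySem.List.pyRange 0 (PySem.Str.len x) 1).foldl
    (fun (ac : List Char × List Char) i =>
      match PySem.Str.pyGet? x i with
      | some c =>
        if i = 0 ∨ PySem.Int.mod i 2 = 0 then (ac.1 ++ [c], ac.2)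
        else (ac.1, ac.2 ++ [c])
      | none => ac)
    ([], [])
  String.ofList (r.1 ++ r.2)

-- ===== PORT B =====
-- literal port of `return x[::2] + x[1::2]` on code points; step 2 ≠ 0 so slice? is never none.
def evenThenOdd_alt (x : String) : String :=
  String.ofList ((PySem.List.slice? x.toList none none 2).getD []
    ++ (PySem.List.slice? x.toList (some 1) none 2).getD [])

-- ===== PRECONDITION & SPEC =====
def Spec_evenThenOdd (x : String) (out : String) : Prop := out = evenThenOdd_alt x
instance (x : String) (out : String) : Decidable (Spec_evenThenOdd x out) := by unfold Spec_evenThenOdd; infer_instance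

-- ===== CLAIM (what is proved, stated in full; the proofs are below) =====
def Claim_equal_evenThenOdd : Prop := ∀ (x : String), Dom_evenThenOdd x → Spec_evenThenOdd x (evenThenOdd x)

-- ===== LEMMAS AND PROOFS =====

-- proof-only helpers: the characters of l at even / odd indices, in order
def pvEvens {α : Type} : List α → List α
  | [] => []
  | [a] => [a]
  | a :: _ :: t => a :: pvEvens t

def pvOdds {α : Type} : List α → List α
  | [] => []
  | [_] => []
  | _ :: b :: t => b :: pvOdds t

lemma pvEvens_append_singleton {α : Type} (l : List α) (a : α) :
    pvEvens (l ++ [a]) = if l.length % 2 = 0 then pvEvens l ++ [a] else pvEvens l := by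
  induction l using pvEvens.induct with
  | case1 => simp [pvEvens]
  | case2 x => simp [pvEvens]
  | case3 x y t ih =>
    by_cases h : t.length % 2 = 0 <;> simp [pvEvens, ih, h, Nat.add_mod] <;> omega

lemma pvOdds_append_singleton {α : Type} (l : List α) (a : α) :
    pvOdds (l ++ [a]) = if l.length % 2 = 0 then pvOdds l else pvOdds l ++ [a] := by
  induction l using pvOdds.induct with
  | case1 => simp [pvOdds]
  | case2 x => simp [pvOdds]
  | case3 x y t ih =>
    by_cases h : t.length % 2 = 0 <;> simp [pvOdds, ih, h, Nat.add_mod] <;> omega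

-- A's loop over the first n indices builds exactly (pvEvens (take n), pvOdds (take n))
lemma pvA_loop (x : String) (n : Nat) (hn : n ≤ x.toList.length) :
    (List.range n).foldl
      (fun (ac : List Char × List Char) (k : Nat) =>
        match PySem.Str.pyGet? x (k : Int) with
        | some c =>
          if (k : Int) = 0 ∨ PySem.Int.mod (k : Int) 2 = 0 then (ac.1 ++ [c], ac.2)
          else (ac.1, ac.2 ++ [c])
        | none => ac)
      ([], [])
      = (pvEvens (x.toList.take n), pvOdds (x.toList.take n)) := by
  induction n with
  | zero => simp [pvEvens, pvOdds]
  | succ n ih =>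
    have hn' : n ≤ x.toList.length := by omega
    have hlt : n < x.toList.length := by omega
    rw [List.range_succ, List.foldl_append, ih hn']
    simp only [List.foldl_cons, List.foldl_nil]
    rw [PySem.Str.pyGet?_natCast]
    have hget : x.toList[(n:Nat)]? = some (x.toList[n]'hlt) := List.getElem?_eq_getElem hlt
    rw [hget]
    dsimp only
    have htake : x.toList.take (n+1) = x.toList.take n ++ [x.toList[n]'hlt] := by
      rw [List.take_add_one, hget]; rfl
    have hlen : (x.toList.take n).length = n := by rw [List.length_take]; omega
    by_cases h : n % 2 = 0
    · have hcond : ((n:Int) = 0 ∨ PySem.Int.mod (n : Int) 2 = 0) := by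
        right
        rw [PySem.Int.mod_eq_emod_of_pos (by norm_num : (0:Int) < 2)]
        omega
      rw [if_pos hcond]
      rw [htake, pvEvens_append_singleton, pvOdds_append_singleton, hlen, if_pos h, if_pos h]
    · have hcond : ¬((n:Int) = 0 ∨ PySem.Int.mod (n : Int) 2 = 0) := by
        rw [PySem.Int.mod_eq_emod_of_pos (by norm_num : (0:Int) < 2), not_or]
        constructor <;> omega
      rw [if_neg hcond]
      rw [htake, pvEvens_append_singleton, pvOdds_append_singleton, hlen, if_neg h, if_neg h]

lemma pvA_char (x : String) :
    evenThenOdd x = String.ofList (pvEvens x.toList ++ pvOdds x.toList) := by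
  unfold evenThenOdd
  simp only [PySem.Str.len_eq, PySem.List.pyRange_zero_natCast, List.foldl_map]
  rw [pvA_loop x x.toList.length (le_refl _), List.take_length]

-- a cons-cons index step for getElem?, used twice below
lemma pvCons2 {α : Type} (a b : α) (t : List α) (k : Nat) :
    (a :: b :: t)[2*k+2]? = t[2*k]? := by
  show (a :: b :: t)[(2*k+1)+1]? = t[2*k]?
  rw [List.getElem?_cons_succ]
  show (b :: t)[(2*k)+1]? = t[2*k]?
  rw [List.getElem?_cons_succ]

lemma pvCons2' {α : Type} (a b : α) (t : List α) (k : Nat) :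
    (a :: b :: t)[2*k+3]? = t[2*k+1]? := by
  show (a :: b :: t)[(2*k+2)+1]? = t[2*k+1]?
  rw [List.getElem?_cons_succ]
  show (b :: t)[(2*k+1)+1]? = t[2*k+1]?
  rw [List.getElem?_cons_succ]

lemma pvFm_even {α : Type} (l : List α) :
    List.filterMap (fun k : Nat => l[(2 * (k:Int)).toNat]?) (List.range ((l.length+1)/2)) = pvEvens l := by
  induction l using pvEvens.induct with
  | case1 => simp [pvEvens]
  | case2 a => simp [pvEvens, List.range_succ]
  | case3 a b t ih =>
    have hc : ((a :: b :: t).length + 1) / 2 = (t.length + 1) / 2 + 1 := by simp; omega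
    rw [hc, List.range_succ_eq_map, List.filterMap_cons, List.filterMap_map]
    have h0 : ((2 : Int) * ((0:Nat):Int)).toNat = 0 := by simp
    simp only [h0]
    have hp : ∀ k ∈ List.range ((t.length+1)/2),
        ((fun k : Nat => (a :: b :: t)[(2 * (k:Int)).toNat]?) ∘ Nat.succ) k
          = (fun k : Nat => t[(2 * (k:Int)).toNat]?) k := by
      intro k _
      have h2 : ((2:Int) * (((k:Int))+1)).toNat = 2*k+2 := by omega
      have h3 : ((2:Int) * ((k : Nat):Int)).toNat = 2*k := by omega
      simp only [Function.comp_apply, Nat.succ_eq_add_one, Nat.cast_add, Nat.cast_one, h2, h3]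
      exact pvCons2 a b t k
    rw [List.filterMap_congr hp, ih]
    simp [pvEvens]

lemma pvFm_odd {α : Type} (l : List α) :
    List.filterMap (fun k : Nat => l[(1 + 2 * (k:Int)).toNat]?) (List.range (l.length/2)) = pvOdds l := by
  induction l using pvOdds.induct with
  | case1 => simp [pvOdds]
  | case2 a => simp [pvOdds]
  | case3 a b t ih =>
    have hc : (a :: b :: t).length / 2 = t.length / 2 + 1 := by simp; omega
    rw [hc, List.range_succ_eq_map, List.filterMap_cons, List.filterMap_map]
    have h0 : ((1:Int) + 2 * ((0:Nat):Int)).toNat = 1 := by simp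
    simp only [h0]
    have hp : ∀ k ∈ List.range (t.length/2),
        ((fun k : Nat => (a :: b :: t)[(1 + 2 * (k:Int)).toNat]?) ∘ Nat.succ) k
          = (fun k : Nat => t[(1 + 2 * (k:Int)).toNat]?) k := by
      intro k _
      have h2 : ((1:Int) + 2 * (((k:Int))+1)).toNat = 2*k+3 := by omega
      have h3 : ((1:Int) + 2 * ((k : Nat):Int)).toNat = 2*k+1 := by omega
      simp only [Function.comp_apply, Nat.succ_eq_add_one, Nat.cast_add, Nat.cast_one, h2, h3]
      exact pvCons2' a b t k
    rw [List.filterMap_congr hp, ih]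
    simp [pvOdds]

lemma pvSlice_evens {α : Type} (l : List α) :
    PySem.List.slice? l none none 2 = some (pvEvens l) := by
  simp [PySem.List.slice?, PySem.List.sliceIndices]
  have hc : (if 0 < l.length then (((l.length:Int) + 2 - 1) / 2).toNat else 0) = (l.length + 1) / 2 := by
    split <;> omega
  rw [hc]
  exact pvFm_even l

lemma pvSlice_odds {α : Type} (l : List α) :
    PySem.List.slice? l (some 1) none 2 = some (pvOdds l) := by
  cases l with
  | nil => simp [PySem.List.slice?, PySem.List.sliceIndices, pvOdds]
  | cons a t =>
    simp [PySem.List.slice?, PySem.List.sliceIndices]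
    have hc : (if 0 < t.length then (((t.length:Int) + 2 - 1) / 2).toNat else 0)
        = (a :: t).length / 2 := by
      split <;> simp <;> omega
    rw [hc]
    exact pvFm_odd (a :: t)

lemma pvB_char (x : String) :
    evenThenOdd_alt x = String.ofList (pvEvens x.toList ++ pvOdds x.toList) := by
  simp [evenThenOdd_alt, pvSlice_evens, pvSlice_odds]

-- ===== VERDICT (by name: the statement is the Claim_ definition above) =====
theorem evenThenOdd_spec : Claim_equal_evenThenOdd := by
  intro x _
  unfold Spec_evenThenOdd
  rw [pvA_char, pvB_char]
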